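-- pv_equiv track=rewrite | github.com/catyugu/hpc-fem-playground | scripts/mphtxt_to_mfem_mesh.py | is_dihedral_quad
-- ===== SOURCE A (Python) =====
-- def is_dihedral_quad(base, test):
--     if len(base) != 4 or len(test) != 4:
--         return False
--
--     for shift in range(4):
--         if all(test[i] == base[(i + shift) % 4] for i in range(4)):
--             return True
--
--     reversed_base = [base[0], base[3], base[2], base[1]]
--     for shift in range(4):
--         if all(test[i] == reversed_base[(i + shift) % 4] for i in range(4)):
--             return True
--     return False
-- ===== SOURCE B (Python) =====
-- def _canon(q):
--     # lexicographically least element of the dihedral orbit of q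
--     best = list(q)
--     for r in (list(q), list(q)[::-1]):
--         for s in range(4):
--             img = r[s:] + r[:s]
--             if img < best:
--                 best = img
--     return best
--
-- def is_dihedral_quad(base, test):
--     if len(base) != 4 or len(test) != 4:
--         return False
--     return _canon(base) == _canon(test)
-- ===== Notes on version B (the rewrite author's own statement) =====
-- stated objective: alternative
-- what changed: B canonicalises each quad to the lexicographically least element of its own dihedral orbit and compares the two normal forms, instead of A's eight per-shift scans of test against base with modular indexing.
import Mathlib
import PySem

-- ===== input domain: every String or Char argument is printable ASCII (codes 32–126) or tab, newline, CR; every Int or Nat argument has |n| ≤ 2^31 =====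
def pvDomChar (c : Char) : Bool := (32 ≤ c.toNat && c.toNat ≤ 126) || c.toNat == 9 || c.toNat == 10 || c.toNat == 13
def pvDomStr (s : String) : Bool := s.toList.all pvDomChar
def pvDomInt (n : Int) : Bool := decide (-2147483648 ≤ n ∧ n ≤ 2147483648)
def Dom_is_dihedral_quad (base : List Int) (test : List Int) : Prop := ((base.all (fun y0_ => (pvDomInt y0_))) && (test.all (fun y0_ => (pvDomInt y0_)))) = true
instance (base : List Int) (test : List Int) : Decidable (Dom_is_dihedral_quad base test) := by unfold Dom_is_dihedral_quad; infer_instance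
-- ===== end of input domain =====

-- B canonicalises both quads (lexicographically least element of each dihedral orbit) and compares the two normal forms, instead of A's per-shift modular-index scans of test against base's orbit (objective: alternative).


-- ===== PORT A =====
-- literal port of A: two shift loops with all(test[i] == base[(i+shift)%4]) via pyGet?/Int.mod
def is_dihedral_quad (base : List Int) (test : List Int) : Bool :=
  if base.length ≠ 4 ∨ test.length ≠ 4 then false
  else if (PySem.List.pyRange 0 4 1).any (fun shift =>
      (PySem.List.pyRange 0 4 1).all (fun i =>
        PySem.List.pyGet? test i == PySem.List.pyGet? base (PySem.Int.mod (i + shift) 4))) then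
    true
  else
    let reversed_base : List Int :=
      [PySem.List.pyGetD base 0 0, PySem.List.pyGetD base 3 0,
       PySem.List.pyGetD base 2 0, PySem.List.pyGetD base 1 0]
    if (PySem.List.pyRange 0 4 1).any (fun shift =>
      (PySem.List.pyRange 0 4 1).all (fun i =>
        PySem.List.pyGet? test i == PySem.List.pyGet? reversed_base (PySem.Int.mod (i + shift) 4))) then
      true
    else false

-- ===== PORT B =====
-- Python's '<' on lists of ints (strict lexicographic compare; exact for int lists)
def pvLt : List Int → List Int → Bool
  | [], [] => false
  | [], _ :: _ => true
  | _ :: _, [] => false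
  | a :: as, b :: bs => if a < b then true else if b < a then false else pvLt as bs

-- r[s:] + r[:s] for s in range(4), as in Source B's inner loop
def pvRots (r : List Int) : List (List Int) :=
  (PySem.List.pyRange 0 4 1).map (fun s =>
    PySem.List.slice r (some s) none ++ PySem.List.slice r none (some s))

-- _canon: best = list(q); loop over the 8 images updating best when img < best
def pvCanon (q : List Int) : List Int :=
  (pvRots q ++ pvRots q.reverse).foldl (fun best img => if pvLt img best then img else best) q

-- literal port of B: normalise both quads to their orbit's least element and compare
def is_dihedral_quad_alt (base : List Int) (test : List Int) : Bool :=
  if base.length ≠ 4 ∨ test.length ≠ 4 then false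
  else pvCanon base == pvCanon test

-- ===== PRECONDITION & SPEC =====
def Spec_is_dihedral_quad (base : List Int) (test : List Int) (out : Bool) : Prop := out = is_dihedral_quad_alt base test
instance (base : List Int) (test : List Int) (out : Bool) : Decidable (Spec_is_dihedral_quad base test out) := by unfold Spec_is_dihedral_quad; infer_instance

-- ===== CLAIM (what is proved, stated in full; the proofs are below) =====
def Claim_equal_is_dihedral_quad : Prop := ∀ (base : List Int) (test : List Int), Dom_is_dihedral_quad base test → Spec_is_dihedral_quad base test (is_dihedral_quad base test)

-- ===== LEMMAS AND PROOFS =====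

-- min w.r.t. pvLt, the fold's step function
def pvM (best img : List Int) : List Int := if pvLt img best then img else best

theorem pvLt_asymm : ∀ a b : List Int, pvLt a b = true → pvLt b a = false
  | [], [] => by simp [pvLt]
  | [], _ :: _ => by simp [pvLt]
  | _ :: _, [] => by simp [pvLt]
  | x :: xs, y :: ys => by
    simp only [pvLt]
    intro h
    by_cases h1 : x < y
    · simp [show ¬ y < x from by omega, h1]
    · by_cases h2 : y < x
      · simp [h1, h2] at h
      · simp [h1, h2] at h ⊢
        exact pvLt_asymm xs ys h

theorem pvLt_antisymm : ∀ a b : List Int, pvLt a b = false → pvLt b a = false → a = b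
  | [], [] => by simp
  | [], _ :: _ => by simp [pvLt]
  | _ :: _, [] => by simp [pvLt]
  | x :: xs, y :: ys => by
    simp only [pvLt]
    intro h1 h2
    by_cases hxy : x < y
    · simp [hxy] at h1
    · by_cases hyx : y < x
      · simp [hyx] at h2
      · have hx : x = y := by omega
        subst hx
        simp at h1 h2
        rw [pvLt_antisymm xs ys h1 h2]

theorem pvLt_trans : ∀ a b c : List Int, pvLt a b = true → pvLt b c = true → pvLt a c = true
  | [], [], _ => by simp [pvLt]
  | [], _ :: _, [] => by simp [pvLt]
  | [], _ :: _, _ :: _ => by simp [pvLt]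
  | _ :: _, [], _ => by simp [pvLt]
  | x :: xs, y :: ys, [] => by simp [pvLt]
  | x :: xs, y :: ys, z :: zs => by
    simp only [pvLt]
    intro h1 h2
    by_cases hxy : x < y
    · by_cases hyz : y < z
      · simp [show x < z from by omega]
      · by_cases hzy : z < y
        · simp [hyz, hzy] at h2
        · have : y = z := by omega
          subst this
          simp [show x < y from hxy]
    · by_cases hyx : y < x
      · simp [hxy, hyx] at h1
      · have hx : x = y := by omega
        subst hx
        simp at h1
        by_cases hxz : x < z
        · simp [hxz]
        · by_cases hzx : z < x
          · simp [hxz, hzx] at h2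
          · simp [hxz, hzx] at h2 ⊢
            exact pvLt_trans xs ys zs h1 h2

theorem pvNotLt_trans {a b c : List Int} (h1 : pvLt b a = false) (h2 : pvLt c b = false) :
    pvLt c a = false := by
  by_cases h : pvLt c a = true
  · rcases hbc : pvLt b c with _ | _
    · have := pvLt_antisymm c b h2 hbc
      subst this
      simp_all
    · have := pvLt_trans b c a hbc h
      simp_all
  · simpa using h

theorem pvM_idem (a : List Int) : pvM a a = a := by
  unfold pvM; split_ifs <;> rfl

theorem pvM_comm (a b : List Int) : pvM a b = pvM b a := by
  unfold pvM
  rcases h1 : pvLt b a <;> rcases h2 : pvLt a b <;> simp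
  · exact pvLt_antisymm a b h2 h1
  · have := pvLt_asymm a b h2
    simp [h1] at this

theorem pvM_assoc (a b c : List Int) : pvM (pvM a b) c = pvM a (pvM b c) := by
  unfold pvM
  rcases h1 : pvLt b a <;> rcases h2 : pvLt c b <;> simp [h1, h2]
  · simp [pvNotLt_trans h1 h2]
  · simp [pvLt_trans c b a h2 h1]

theorem pvM_left_comm (a b c : List Int) : pvM a (pvM b c) = pvM b (pvM a c) := by
  rw [← pvM_assoc, pvM_comm a b, pvM_assoc]

theorem pvM_choice (a b : List Int) : pvM a b = a ∨ pvM a b = b := by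
  unfold pvM; split_ifs <;> simp

theorem pvFoldl_pvM_mem : ∀ (l : List (List Int)) (q : List Int),
    l.foldl pvM q = q ∨ l.foldl pvM q ∈ l := by
  intro l
  induction l with
  | nil => intro q; left; rfl
  | cons h t ih =>
    intro q
    rcases ih (pvM q h) with h1 | h1 <;> rw [List.foldl_cons]
    · rcases pvM_choice q h with h2 | h2
      · left; rw [h1, h2]
      · right; rw [h1, h2]; exact List.mem_cons_self
    · right; exact List.mem_cons_of_mem _ h1

-- shorthand for the dihedral orbit of a 4-tuple
def pvOrb (a b c d : Int) : List (List Int) :=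
  [[a,b,c,d], [b,c,d,a], [c,d,a,b], [d,a,b,c], [d,c,b,a], [c,b,a,d], [b,a,d,c], [a,d,c,b]]

-- pvCanon on an explicit 4-list is the fold of pvM over the orbit
theorem pvCanon_explicit (a b c d : Int) :
    pvCanon [a, b, c, d] = (pvOrb a b c d).foldl pvM [a,b,c,d] := rfl

theorem pvCanon_mem (a b c d : Int) : pvCanon [a, b, c, d] ∈ pvOrb a b c d := by
  rw [pvCanon_explicit]
  rcases pvFoldl_pvM_mem (pvOrb a b c d) [a,b,c,d] with h1 | h1
  · rw [h1]; simp [pvOrb]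
  · exact h1

-- canonical form is invariant under each of the 8 dihedral images
theorem pvCanon_rot1 (a b c d : Int) : pvCanon [b,c,d,a] = pvCanon [a,b,c,d] := by
  rw [pvCanon_explicit, pvCanon_explicit]
  simp only [pvOrb, List.foldl]
  simp [pvM_comm, pvM_assoc, pvM_left_comm, pvM_idem]

theorem pvCanon_rot2 (a b c d : Int) : pvCanon [c,d,a,b] = pvCanon [a,b,c,d] := by
  rw [pvCanon_explicit, pvCanon_explicit]
  simp only [pvOrb, List.foldl]
  simp [pvM_comm, pvM_assoc, pvM_left_comm, pvM_idem]

theorem pvCanon_rot3 (a b c d : Int) : pvCanon [d,a,b,c] = pvCanon [a,b,c,d] := by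
  rw [pvCanon_explicit, pvCanon_explicit]
  simp only [pvOrb, List.foldl]
  simp [pvM_comm, pvM_assoc, pvM_left_comm, pvM_idem]

theorem pvCanon_ref0 (a b c d : Int) : pvCanon [d,c,b,a] = pvCanon [a,b,c,d] := by
  rw [pvCanon_explicit, pvCanon_explicit]
  simp only [pvOrb, List.foldl]
  simp [pvM_comm, pvM_assoc, pvM_left_comm, pvM_idem]

theorem pvCanon_ref1 (a b c d : Int) : pvCanon [c,b,a,d] = pvCanon [a,b,c,d] := by
  rw [pvCanon_explicit, pvCanon_explicit]
  simp only [pvOrb, List.foldl]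
  simp [pvM_comm, pvM_assoc, pvM_left_comm, pvM_idem]

theorem pvCanon_ref2 (a b c d : Int) : pvCanon [b,a,d,c] = pvCanon [a,b,c,d] := by
  rw [pvCanon_explicit, pvCanon_explicit]
  simp only [pvOrb, List.foldl]
  simp [pvM_comm, pvM_assoc, pvM_left_comm, pvM_idem]

theorem pvCanon_ref3 (a b c d : Int) : pvCanon [a,d,c,b] = pvCanon [a,b,c,d] := by
  rw [pvCanon_explicit, pvCanon_explicit]
  simp only [pvOrb, List.foldl]
  simp [pvM_comm, pvM_assoc, pvM_left_comm, pvM_idem]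

-- orbit membership ↔ equal canonical forms
set_option maxHeartbeats 2000000 in
theorem pvCanon_iff (b0 b1 b2 b3 t0 t1 t2 t3 : Int) :
    [t0,t1,t2,t3] ∈ pvOrb b0 b1 b2 b3 ↔
      pvCanon [b0,b1,b2,b3] = pvCanon [t0,t1,t2,t3] := by
  constructor
  · intro h
    simp only [pvOrb, List.mem_cons, List.not_mem_nil, or_false, List.cons.injEq, and_true] at h
    rcases h with ⟨rfl,rfl,rfl,rfl⟩|⟨rfl,rfl,rfl,rfl⟩|⟨rfl,rfl,rfl,rfl⟩|⟨rfl,rfl,rfl,rfl⟩|⟨rfl,rfl,rfl,rfl⟩|⟨rfl,rfl,rfl,rfl⟩|⟨rfl,rfl,rfl,rfl⟩|⟨rfl,rfl,rfl,rfl⟩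
    · rfl
    · exact (pvCanon_rot1 _ _ _ _).symm
    · exact (pvCanon_rot2 _ _ _ _).symm
    · exact (pvCanon_rot3 _ _ _ _).symm
    · exact (pvCanon_ref0 _ _ _ _).symm
    · exact (pvCanon_ref1 _ _ _ _).symm
    · exact (pvCanon_ref2 _ _ _ _).symm
    · exact (pvCanon_ref3 _ _ _ _).symm
  · intro h
    have hb := pvCanon_mem b0 b1 b2 b3
    have ht := pvCanon_mem t0 t1 t2 t3
    rw [h] at hb
    simp only [pvOrb, List.mem_cons, List.not_mem_nil, or_false] at hb ht ⊢
    rcases ht with ht|ht|ht|ht|ht|ht|ht|ht <;> rw [ht] at hb <;>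
      simp only [List.cons.injEq, and_true] at hb <;>
      rcases hb with ⟨rfl,rfl,rfl,rfl⟩|⟨rfl,rfl,rfl,rfl⟩|⟨rfl,rfl,rfl,rfl⟩|⟨rfl,rfl,rfl,rfl⟩|⟨rfl,rfl,rfl,rfl⟩|⟨rfl,rfl,rfl,rfl⟩|⟨rfl,rfl,rfl,rfl⟩|⟨rfl,rfl,rfl,rfl⟩ <;>
      simp

theorem pvLen4 {l : List Int} (h : l.length = 4) :
    ∃ a b c d, l = [a, b, c, d] := by
  match l with
  | [a, b, c, d] => exact ⟨a, b, c, d, rfl⟩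

-- A's condition on explicit 4-tuples is orbit membership
theorem pvRange4 : List.range (Int.toNat 4) = [0, 1, 2, 3] := by decide

set_option maxRecDepth 4000 in
set_option maxHeartbeats 1000000 in
theorem pvA_mem (b0 b1 b2 b3 t0 t1 t2 t3 : Int) :
    is_dihedral_quad [b0,b1,b2,b3] [t0,t1,t2,t3] = true ↔
      [t0,t1,t2,t3] ∈ pvOrb b0 b1 b2 b3 := by
  simp only [is_dihedral_quad]
  norm_num [PySem.List.pyRange, PySem.Int.mod, PySem.List.pyGet?, PySem.List.pyIdx?,
        PySem.List.pyGetD, List.any_cons, List.all_cons, -List.any_eq_true, -List.all_eq_true,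
        pvRange4, Function.comp, List.mem_cons, List.not_mem_nil, pvOrb]
  have hf1 : Int.fmod 1 4 = 1 := by decide
  have hf2 : Int.fmod 2 4 = 2 := by decide
  have hf3 : Int.fmod 3 4 = 3 := by decide
  have hf5 : Int.fmod 5 4 = 1 := by decide
  have hf6 : Int.fmod 6 4 = 2 := by decide
  have ht2 : Int.toNat 2 = 2 := rfl
  have ht3 : Int.toNat 3 = 3 := rfl
  simp only [hf1, hf2, hf3, hf5, hf6, ht2, ht3]
  norm_num
  simp only [or_assoc]
  refine or_congr Iff.rfl (or_congr Iff.rfl (or_congr Iff.rfl (or_congr Iff.rfl ?_)))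
  rw [or_rotate, or_assoc]

-- ===== VERDICT (by name: the statement is the Claim_ definition above) =====
theorem is_dihedral_quad_spec : Claim_equal_is_dihedral_quad := by
  intro base test _
  unfold Spec_is_dihedral_quad
  by_cases hb : base.length = 4
  · by_cases ht : test.length = 4
    · obtain ⟨b0, b1, b2, b3, rfl⟩ := pvLen4 hb
      obtain ⟨t0, t1, t2, t3, rfl⟩ := pvLen4 ht
      have halt : is_dihedral_quad_alt [b0,b1,b2,b3] [t0,t1,t2,t3] = true ↔
          pvCanon [b0,b1,b2,b3] = pvCanon [t0,t1,t2,t3] := by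
        simp [is_dihedral_quad_alt]
      rw [Bool.eq_iff_iff, pvA_mem, halt]
      exact pvCanon_iff b0 b1 b2 b3 t0 t1 t2 t3
    · simp [is_dihedral_quad, is_dihedral_quad_alt, ht]
  · simp [is_dihedral_quad, is_dihedral_quad_alt, hb]
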